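-- pv_equiv track=rewrite | github.com/HillSide2026/ll-secondbrain | scripts/run_matter_admin.py | detect_missing_expected_folders
-- ===== SOURCE A (Python) =====
-- from typing import Any, Dict, Iterable, List, Optional, Tuple
--
-- def detect_missing_expected_folders(rows: List[Dict[str, Any]], expected_folders: List[str]) -> List[str]:
--     if not expected_folders:
--         return []
--     present = set()
--     for row in rows:
--         path = str(row.get("path") or "")
--         for segment in path.split("/"):
--             segment = segment.strip()
--             if segment:
--                 present.add(segment.lower())
--     missing = [folder for folder in expected_folders if folder.lower() not in present]
--     return sorted(missing, key=lambda value: value.lower())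
-- ===== SOURCE B (Python) =====
-- def detect_missing_expected_folders(rows, expected_folders):
--     if not expected_folders:
--         return []
--
--     def found(target):
--         for row in rows:
--             path = str(row.get("path") or "")
--             for seg in path.split("/"):
--                 s = seg.strip()
--                 if s and s.lower() == target:
--                     return True
--         return False
--
--     missing = [f for f in expected_folders if not found(f.lower())]
--     return sorted(missing, key=lambda v: v.lower())
-- ===== Notes on version B (the rewrite author's own statement) =====
-- stated objective: alternative
-- what changed: Dropped the global 'present' set entirely: for each expected folder B re-scans the rows with a per-folder search (early return on the first matching stripped lowercased segment), so no index is built at all.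
import Mathlib
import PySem

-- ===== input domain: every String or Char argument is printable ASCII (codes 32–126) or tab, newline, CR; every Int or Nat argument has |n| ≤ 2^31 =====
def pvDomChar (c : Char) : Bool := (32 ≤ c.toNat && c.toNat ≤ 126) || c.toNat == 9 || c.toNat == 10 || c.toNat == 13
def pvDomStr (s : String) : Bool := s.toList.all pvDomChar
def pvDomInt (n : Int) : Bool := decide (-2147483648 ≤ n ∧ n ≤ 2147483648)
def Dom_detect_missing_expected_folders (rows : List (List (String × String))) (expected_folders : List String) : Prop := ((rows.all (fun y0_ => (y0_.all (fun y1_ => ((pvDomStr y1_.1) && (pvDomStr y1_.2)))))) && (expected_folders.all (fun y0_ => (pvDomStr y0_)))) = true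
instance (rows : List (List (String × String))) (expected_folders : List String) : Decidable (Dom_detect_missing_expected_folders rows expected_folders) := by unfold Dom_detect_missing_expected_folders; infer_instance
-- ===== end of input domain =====

-- B drops A's global 'present' index entirely: for each expected folder it re-scans the rows with a per-folder
-- search that stops at the first matching stripped lowercased segment (objective: alternative, not faster).
-- ===== PORT A =====
def detect_missing_expected_folders (rows : List (List (String × String))) (expected_folders : List String) : List String :=
  if expected_folders = [] then []
  else
    let present : PySem.Set String := rows.foldl (fun pres row =>
      let path := (PySem.Dict.mk row).getD "path" ""   -- str(row.get("path") or ""): '' when missing or falsy ('' or '' = '')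
      ((PySem.Str.split? path "/").getD []).foldl (fun pres segment =>   -- sep "/" ≠ "", so split? is always some
        let segment := PySem.Str.strip segment
        if segment ≠ "" then PySem.Set.add pres (PySem.Str.lower segment) else pres) pres)
      PySem.Set.empty
    let missing := expected_folders.filter (fun folder => !(PySem.Set.contains present (PySem.Str.lower folder)))
    PySem.List.sorted missing (fun value => PySem.Str.lower value) false

-- ===== PORT B =====
-- found(target): the nested loops with early 'return True' become nested List.any
def pvFound (rows : List (List (String × String))) (target : String) : Bool :=
  rows.any (fun row =>
    let path := (PySem.Dict.mk row).getD "path" ""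
    ((PySem.Str.split? path "/").getD []).any (fun seg =>
      let s := PySem.Str.strip seg
      s ≠ "" && (PySem.Str.lower s == target)))

def detect_missing_expected_folders_alt (rows : List (List (String × String))) (expected_folders : List String) : List String :=
  if expected_folders = [] then []
  else
    let missing := expected_folders.filter (fun f => !pvFound rows (PySem.Str.lower f))
    PySem.List.sorted missing (fun v => PySem.Str.lower v) false

-- ===== PRECONDITION & SPEC =====
def Spec_detect_missing_expected_folders (rows : List (List (String × String))) (expected_folders : List String) (out : List String) : Prop := out = detect_missing_expected_folders_alt rows expected_folders
instance (rows : List (List (String × String))) (expected_folders : List String) (out : List String) : Decidable (Spec_detect_missing_expected_folders rows expected_folders out) := by unfold Spec_detect_missing_expected_folders; infer_instance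

-- ===== CLAIM (what is proved, stated in full; the proofs are below) =====
def Claim_equal_detect_missing_expected_folders : Prop := ∀ (rows : List (List (String × String))) (expected_folders : List String), Dom_detect_missing_expected_folders rows expected_folders → Spec_detect_missing_expected_folders rows expected_folders (detect_missing_expected_folders rows expected_folders)

-- ===== LEMMAS AND PROOFS =====

lemma mem_seg_foldl (segs : List String) (pres : PySem.Set String) (x : String) :
    x ∈ segs.foldl (fun pres segment =>
        let segment := PySem.Str.strip segment
        if segment ≠ "" then PySem.Set.add pres (PySem.Str.lower segment) else pres) pres ↔
      x ∈ pres ∨ segs.any (fun seg =>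
        let s := PySem.Str.strip seg
        s ≠ "" && (PySem.Str.lower s == x)) := by
  induction segs generalizing pres with
  | nil => simp
  | cons h t ih =>
    simp only [List.foldl_cons, List.any_cons, ih]
    by_cases hs : PySem.Str.strip h ≠ ""
    · simp [hs, PySem.Set.mem_add]
      constructor
      · rintro ((h1|h1)|h1)
        · exact Or.inl h1
        · exact Or.inr (Or.inl h1.symm)
        · exact Or.inr (Or.inr h1)
      · rintro (h1|h1|h1)
        · exact Or.inl (Or.inl h1)
        · exact Or.inl (Or.inr h1.symm)
        · exact Or.inr h1
    · simp at hs
      simp [hs]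

lemma mem_present (rows : List (List (String × String))) (pres : PySem.Set String) (x : String) :
    x ∈ rows.foldl (fun pres row =>
        let path := (PySem.Dict.mk row).getD "path" ""
        ((PySem.Str.split? path "/").getD []).foldl (fun pres segment =>
          let segment := PySem.Str.strip segment
          if segment ≠ "" then PySem.Set.add pres (PySem.Str.lower segment) else pres) pres) pres ↔
      x ∈ pres ∨ pvFound rows x := by
  induction rows generalizing pres with
  | nil => simp [pvFound]
  | cons r t ih =>
    simp only [List.foldl_cons, ih, pvFound, List.any_cons, mem_seg_foldl, Bool.or_eq_true]
    tauto

lemma contains_present_eq (rows : List (List (String × String))) (x : String) :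
    PySem.Set.contains (rows.foldl (fun pres row =>
        let path := (PySem.Dict.mk row).getD "path" ""
        ((PySem.Str.split? path "/").getD []).foldl (fun pres segment =>
          let segment := PySem.Str.strip segment
          if segment ≠ "" then PySem.Set.add pres (PySem.Str.lower segment) else pres) pres)
      PySem.Set.empty) x = pvFound rows x := by
  have hmem := mem_present rows PySem.Set.empty x
  simp only [PySem.Set.contains_eq_listContains, PySem.Set.empty, List.mem_nil_iff, false_or,
    ne_eq, ite_not] at hmem ⊢
  by_cases hp : pvFound rows x
  · rw [hp]
    exact List.contains_iff_mem.mpr (hmem.mpr hp)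
  · rw [Bool.not_eq_true] at hp
    rw [hp, ← Bool.not_eq_true, List.contains_iff_mem]
    exact fun h => absurd (hmem.mp h) (by simp [hp])

-- ===== VERDICT (by name: the statement is the Claim_ definition above) =====
theorem detect_missing_expected_folders_spec : Claim_equal_detect_missing_expected_folders := by
  intro rows expected_folders _
  unfold Spec_detect_missing_expected_folders detect_missing_expected_folders detect_missing_expected_folders_alt
  by_cases he : expected_folders = []
  · simp [he]
  · simp only [he, if_false]
    refine congrArg (fun l => PySem.List.sorted l (fun value => PySem.Str.lower value) false) ?_
    refine List.filter_congr ?_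
    intro f _
    rw [contains_present_eq]
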